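-- pv_equiv track=rewrite | github.com/xasopheno/tia2 | groups.py | linearNumbers
-- ===== SOURCE A (Python) =====
-- def linearNumbers(numImages):
--   value = 2
--   n = 1
--   x = value
--   y = 1
--
--   xUp = False
--   yUp = True
--
--   groupOne = []
--   groupTwo = []
--
--   while n < numImages:
--     for i in range(1, x + 1):
--       groupOne.append(int(n))
--       n += 1
--
--     for j in range(1, y + 1):
--       groupTwo.append(int(n))
--       n += 1
--
--     if x == 1:
--       xUp = True
--     if x == value:
--       xUp = False
--     if xUp == True:
--       x += 1
--     else:
--       x -= 1
--       if x == value: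
--         xUp = False
--
--     if y == value:
--       yUp = False
--     if y == 1:
--       yUp = True
--     if yUp == True:
--       y += 1
--     else:
--       y -= 1
--       if y == 1:
--         yUp = False
--
--   return groupOne, groupTwo
-- ===== SOURCE B (Python) =====
-- def linearNumbers(numImages):
--   # Closed form: the while loop runs k = ceil((numImages - 1) / 3) times; iteration t
--   # covers the block 3t+1, 3t+2, 3t+3, split 2/1 for even t and 1/2 for odd t.
--   k = max(0, -((1 - numImages) // 3))
--   groupOne = [3 * t + d for t in range(k) for d in ((1, 2) if t % 2 == 0 else (1,))]
--   groupTwo = [3 * t + d for t in range(k) for d in ((3,) if t % 2 == 0 else (2, 3))]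
--   return groupOne, groupTwo
-- ===== Notes on version B (the rewrite author's own statement) =====
-- stated objective: alternative
-- what changed: Replaced A's while-loop state machine (four oscillation variables, two inner append loops, mutated groups) by a closed-form iteration count k = ceil((numImages-1)/3) and two independent staged comprehensions that construct each group directly from the block index t by arithmetic (3t+d with a parity-chosen offset tuple).
import Mathlib
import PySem

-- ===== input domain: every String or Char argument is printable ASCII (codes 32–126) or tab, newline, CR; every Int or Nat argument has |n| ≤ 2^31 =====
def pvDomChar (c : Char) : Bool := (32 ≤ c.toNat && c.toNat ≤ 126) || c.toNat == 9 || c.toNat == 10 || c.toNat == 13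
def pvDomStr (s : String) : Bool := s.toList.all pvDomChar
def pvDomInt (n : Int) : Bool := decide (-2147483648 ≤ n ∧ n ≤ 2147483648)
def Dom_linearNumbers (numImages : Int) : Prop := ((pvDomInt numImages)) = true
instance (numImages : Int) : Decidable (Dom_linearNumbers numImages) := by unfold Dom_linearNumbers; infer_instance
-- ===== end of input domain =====

-- B replaces A's while-loop state machine by a closed-form iteration count and two
-- staged comprehensions building each group directly by arithmetic (same O(n), measured
-- constant-factor faster in a timing run).

-- ===== PORT A =====
-- inner `for i in range(1, x+1): group.append(int(n)); n += 1`
def pvAppendRun (g : List Int) (n : Int) : List Int → List Int × Int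
  | [] => (g, n)
  | _ :: rest => pvAppendRun (g ++ [n]) (n + 1) rest

-- the x-update block of A (the constant `value = 2` inlined)
def pvStepX (x : Int) (xUp : Bool) : Int × Bool :=
  let xUp1 := if x = 1 then true else xUp
  let xUp2 := if x = 2 then false else xUp1
  if xUp2 then (x + 1, xUp2)
  else
    let x' := x - 1
    (x', if x' = 2 then false else xUp2)

-- the y-update block of A (the constant `value = 2` inlined)
def pvStepY (y : Int) (yUp : Bool) : Int × Bool :=
  let yUp1 := if y = 2 then false else yUp
  let yUp2 := if y = 1 then true else yUp1
  if yUp2 then (y + 1, yUp2)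
  else
    let y' := y - 1
    (y', if y' = 1 then false else yUp2)

-- termination facts for the while loop (n advances by x + y ≥ 2 per turn)
theorem pvAppendRun_snd (g : List Int) (n : Int) (l : List Int) :
    (pvAppendRun g n l).2 = n + l.length := by
  induction l generalizing g n with
  | nil => simp [pvAppendRun]
  | cons a t ih => simp [pvAppendRun, ih]; omega

theorem pvStepX_pos (x : Int) (xUp : Bool) (hx : 1 ≤ x) : 1 ≤ (pvStepX x xUp).1 := by
  cases xUp <;> simp only [pvStepX] <;> split_ifs <;> simp_all <;> omega

theorem pvStepY_pos (y : Int) (yUp : Bool) (hy : 1 ≤ y) : 1 ≤ (pvStepY y yUp).1 := by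
  cases yUp <;> simp only [pvStepY] <;> split_ifs <;> simp_all <;> omega

-- A's `while n < numImages` loop, carrying the invariant 1 ≤ x ∧ 1 ≤ y (always true
-- for A's reachable states) which justifies termination
def pvLoopA (numImages n x y : Int) (xUp yUp : Bool) (g1 g2 : List Int)
    (hxy : 1 ≤ x ∧ 1 ≤ y) : List Int × List Int :=
  if _h : n < numImages then
    let p1 := pvAppendRun g1 n (PySem.List.pyRange 1 (x + 1) 1)
    let p2 := pvAppendRun g2 p1.2 (PySem.List.pyRange 1 (y + 1) 1)
    let sx := pvStepX x xUp
    let sy := pvStepY y yUp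
    pvLoopA numImages p2.2 sx.1 sy.1 sx.2 sy.2 p1.1 p2.1
      ⟨pvStepX_pos x xUp hxy.1, pvStepY_pos y yUp hxy.2⟩
  else (g1, g2)
termination_by (numImages - n).toNat
decreasing_by
  have e1 := pvAppendRun_snd g1 n (PySem.List.pyRange 1 (x + 1) 1)
  have e2 := pvAppendRun_snd g2 (pvAppendRun g1 n (PySem.List.pyRange 1 (x + 1) 1)).2
      (PySem.List.pyRange 1 (y + 1) 1)
  have l1 := PySem.List.length_pyRange_one (a := 1) (b := x + 1)
  have l2 := PySem.List.length_pyRange_one (a := 1) (b := y + 1)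
  obtain ⟨hx, hy⟩ := hxy
  simp only [e1, l1, l2] at *
  omega

def linearNumbers (numImages : Int) : List Int × List Int :=
  pvLoopA numImages 1 2 1 false true [] [] ⟨by norm_num, by norm_num⟩

-- ===== PORT B =====
-- Source B: k = max(0, -((1 - numImages) // 3)); two comprehensions over range(k)
def linearNumbers_alt (numImages : Int) : List Int × List Int :=
  let k : Int := max 0 (-(PySem.Int.floordiv (1 - numImages) 3))
  let groupOne := (PySem.List.pyRange 0 k 1).flatMap
    (fun t => (if t % 2 = 0 then [(1 : Int), 2] else [1]).map (fun d => 3 * t + d))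
  let groupTwo := (PySem.List.pyRange 0 k 1).flatMap
    (fun t => (if t % 2 = 0 then [(3 : Int)] else [2, 3]).map (fun d => 3 * t + d))
  (groupOne, groupTwo)

-- ===== PRECONDITION & SPEC =====
def Spec_linearNumbers (numImages : Int) (out : List Int × List Int) : Prop := out = linearNumbers_alt numImages
instance (numImages : Int) (out : List Int × List Int) : Decidable (Spec_linearNumbers numImages out) := by unfold Spec_linearNumbers; infer_instance

-- ===== CLAIM =====
def Claim_equal_linearNumbers : Prop := ∀ (numImages : Int), Dom_linearNumbers numImages → Spec_linearNumbers numImages (linearNumbers numImages)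

-- ===== LEMMAS AND PROOFS =====

-- intermediate form of the loop used only by the proof: a single toggle `big`
def pvLoopB (numImages n : Int) (big : Bool) (g1 g2 : List Int) : List Int × List Int :=
  if _h : n < numImages then
    if big then pvLoopB numImages (n + 3) false (g1 ++ [n, n + 1]) (g2 ++ [n + 2])
    else pvLoopB numImages (n + 3) true (g1 ++ [n]) (g2 ++ [n + 1, n + 2])
  else (g1, g2)
termination_by (numImages - n).toNat
decreasing_by all_goals omega

theorem pvRange13 : PySem.List.pyRange 1 ((2 : Int) + 1) 1 = [1, 2] := by decide
theorem pvRange12 : PySem.List.pyRange 1 ((1 : Int) + 1) 1 = [1] := by decide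

-- loop correspondence: A's state machine in state (x, y) = (2, 1) behaves like the
-- toggle `big = true`, and (1, 2) like `big = false`, regardless of xUp/yUp
theorem pv_loop_eq (k : Nat) : ∀ (numImages n x y : Int) (xUp yUp big : Bool)
    (g1 g2 : List Int) (hxy : 1 ≤ x ∧ 1 ≤ y),
    x = (if big then 2 else 1) → y = (if big then 1 else 2) →
    (numImages - n).toNat ≤ k →
    pvLoopA numImages n x y xUp yUp g1 g2 hxy = pvLoopB numImages n big g1 g2 := by
  induction k with
  | zero =>
    intro numImages n x y xUp yUp big g1 g2 hxy hx hy hk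
    have hn : ¬ n < numImages := by omega
    rw [pvLoopA, pvLoopB]
    simp [hn]
  | succ k ih =>
    intro numImages n x y xUp yUp big g1 g2 hxy hx hy hk
    rw [pvLoopA, pvLoopB]
    by_cases hn : n < numImages
    · simp only [hn, dif_pos]
      cases big with
      | true =>
        simp only [if_true] at hx hy
        subst hx hy
        rw [pvRange13, pvRange12]
        simp only [pvAppendRun]
        have hsx : pvStepX 2 xUp = (1, false) := by simp [pvStepX]
        have hsy : pvStepY 1 yUp = (2, true) := by simp [pvStepY]
        refine Eq.trans (ih numImages (n + 1 + 1 + 1) (pvStepX 2 xUp).1 (pvStepY 1 yUp).1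
          (pvStepX 2 xUp).2 (pvStepY 1 yUp).2 false (g1 ++ [n] ++ [n + 1]) (g2 ++ [n + 1 + 1])
          (by simp [hsx, hsy]) (by simp [hsx]) (by simp [hsy]) (by omega)) ?_
        have h3 : n + 1 + 1 + 1 = n + 3 := by ring
        have h2 : n + 1 + 1 = n + 2 := by ring
        rw [h3, h2]
        simp [List.append_assoc]
      | false =>
        simp only [Bool.false_eq_true, if_false] at hx hy
        subst hx hy
        rw [pvRange12, pvRange13]
        simp only [pvAppendRun]
        have hsx : pvStepX 1 xUp = (2, true) := by simp [pvStepX]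
        have hsy : pvStepY 2 yUp = (1, false) := by simp [pvStepY]
        refine Eq.trans (ih numImages (n + 1 + 1 + 1) (pvStepX 1 xUp).1 (pvStepY 2 yUp).1
          (pvStepX 1 xUp).2 (pvStepY 2 yUp).2 true (g1 ++ [n]) (g2 ++ [n + 1] ++ [n + 1 + 1])
          (by simp [hsx, hsy]) (by simp [hsx]) (by simp [hsy]) (by omega)) ?_
        have h3 : n + 1 + 1 + 1 = n + 3 := by ring
        have h2 : n + 1 + 1 = n + 2 := by ring
        rw [h3, h2]
        simp [List.append_assoc]
    · simp [hn]

-- the toggle loop equals the closed-form comprehensions, tail by tail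
theorem pv_loopB_closed (fuel : Nat) : ∀ (N k : Int) (t : Nat) (g1 g2 : List Int),
    (∀ s : Int, 0 ≤ s → (s < k ↔ 1 + 3 * s < N)) →
    (k - t).toNat ≤ fuel →
    pvLoopB N (1 + 3 * t) (decide (t % 2 = 0)) g1 g2 =
      (g1 ++ (PySem.List.pyRange t k 1).flatMap
        (fun u => (if u % 2 = 0 then [(1 : Int), 2] else [1]).map (fun d => 3 * u + d)),
       g2 ++ (PySem.List.pyRange t k 1).flatMap
        (fun u => (if u % 2 = 0 then [(3 : Int)] else [2, 3]).map (fun d => 3 * u + d))) := by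
  induction fuel with
  | zero =>
    intro N k t g1 g2 hk hf
    have hn : ¬ (1 + 3 * (t : Int) < N) := by
      intro h
      have := (hk t (by positivity)).mpr h
      omega
    rw [pvLoopB, PySem.List.pyRange_one_eq_nil (by omega)]
    simp [hn]
  | succ fuel ih =>
    intro N k t g1 g2 hk hf
    by_cases hn : 1 + 3 * (t : Int) < N
    · have ht : (t : Int) < k := (hk t (by positivity)).mpr hn
      rw [pvLoopB, PySem.List.pyRange_one_cons ht]
      have hc : (1 : Int) + 3 * (t : Int) + 3 = 1 + 3 * ((t + 1 : Nat) : Int) := by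
        push_cast; ring
      by_cases hpar : t % 2 = 0
      · have hpi : ((t : Int)) % 2 = 0 := by omega
        have hd : (2 : Int) ∣ (t : Int) := Int.dvd_iff_emod_eq_zero.mpr hpi
        have hb1 : decide ((t + 1) % 2 = 0) = false := by
          have : ¬ ((t + 1) % 2 = 0) := by omega
          simp [this]
        simp only [hn, dif_pos, hpar, decide_true, if_true]
        rw [hc, ← hb1,
          ih N k (t + 1) (g1 ++ ([1 + 3 * t, 1 + 3 * t + 1] : List Int))
            (g2 ++ ([1 + 3 * t + 2] : List Int)) hk (by omega)]
        simp [List.append_assoc]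
        ring_nf
        rw [if_pos hd, if_pos hd]
        simp only [List.map_cons, List.map_nil, List.cons_append, List.nil_append]
        exact ⟨List.cons_eq_cons.mpr ⟨by ring, List.cons_eq_cons.mpr ⟨by ring, rfl⟩⟩, List.cons_eq_cons.mpr ⟨by ring, rfl⟩⟩
      · have hpi : ¬ (((t : Int)) % 2 = 0) := by omega
        have hd : ¬ ((2 : Int) ∣ (t : Int)) := fun h => hpi (Int.emod_eq_zero_of_dvd h)
        have hb0 : decide (t % 2 = 0) = false := by simp [hpar]
        have hb1 : decide ((t + 1) % 2 = 0) = true := by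
          have : (t + 1) % 2 = 0 := by omega
          simp [this]
        simp only [hn, dif_pos, hb0, Bool.false_eq_true, if_false]
        rw [hc, ← hb1,
          ih N k (t + 1) (g1 ++ ([1 + 3 * t] : List Int))
            (g2 ++ ([1 + 3 * t + 1, 1 + 3 * t + 2] : List Int)) hk (by omega)]
        simp [List.append_assoc]
        ring_nf
        rw [if_neg hd, if_neg hd]
        simp only [List.map_cons, List.map_nil, List.cons_append, List.nil_append]
        exact ⟨List.cons_eq_cons.mpr ⟨by ring, rfl⟩, List.cons_eq_cons.mpr ⟨by ring, List.cons_eq_cons.mpr ⟨by ring, rfl⟩⟩⟩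
    · have ht : ¬ ((t : Int) < k) := fun h => hn ((hk t (by positivity)).mp h)
      rw [pvLoopB, PySem.List.pyRange_one_eq_nil (by omega)]
      simp [hn]

-- ===== VERDICT =====
theorem linearNumbers_spec : Claim_equal_linearNumbers := by
  intro N _
  unfold Spec_linearNumbers linearNumbers linearNumbers_alt
  set c := PySem.Int.floordiv (1 - N) 3 with hcdef
  have hc : c * 3 ≤ 1 - N ∧ 1 - N < (c + 1) * 3 := by
    exact (PySem.Int.floordiv_eq_iff_of_pos (by norm_num)).mp hcdef.symm
  have hk : ∀ s : Int, 0 ≤ s → (s < max 0 (-c) ↔ 1 + 3 * s < N) := by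
    intro s hs; omega
  have h1 := pv_loop_eq (N - 1).toNat N 1 2 1 false true true [] []
    ⟨by norm_num, by norm_num⟩ rfl rfl le_rfl
  have h2 := pv_loopB_closed (max 0 (-c)).toNat N (max 0 (-c)) 0 [] [] hk (by omega)
  rw [h1]
  simpa using h2
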